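-- pv_equiv track=rewrite | github.com/khuushichand/aiml-project | tldw_Server_API/app/core/Image_Generation/capabilities.py | _matches_model_family
-- ===== SOURCE A (Python) =====
-- def _matches_model_family(family_root: str, model: str) -> bool:
--     if not family_root or not model:
--         return False
--     if model == family_root:
--         return True
--     for separator in ("-", ".", "_", "/"):
--         if model.startswith(f"{family_root}{separator}"):
--             return True
--     return False
-- ===== SOURCE B (Python) =====
-- def _matches_model_family(family_root: str, model: str) -> bool:
--     if not family_root or not model:
--         return False
--     # One fused left-to-right scan: consume family_root against model character
--     # by character; when the root is exhausted, accept iff the model is exhausted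
--     # too (exact match) or the very next character is a family separator.
--     i = 0
--     while i < len(family_root):
--         if i >= len(model) or model[i] != family_root[i]:
--             return False
--         i += 1
--     return i == len(model) or model[i] in "-._/"
-- ===== Notes on version B (the rewrite author's own statement) =====
-- stated objective: alternative
-- what changed: Replaces A's staged checks (whole-string equality test, then a loop building family_root+sep and prefix-testing it for each of four separators) with one fused left-to-right scan that consumes the root against the model character by character and then decides by end-of-string or a single separator-character test.
import Mathlib
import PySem

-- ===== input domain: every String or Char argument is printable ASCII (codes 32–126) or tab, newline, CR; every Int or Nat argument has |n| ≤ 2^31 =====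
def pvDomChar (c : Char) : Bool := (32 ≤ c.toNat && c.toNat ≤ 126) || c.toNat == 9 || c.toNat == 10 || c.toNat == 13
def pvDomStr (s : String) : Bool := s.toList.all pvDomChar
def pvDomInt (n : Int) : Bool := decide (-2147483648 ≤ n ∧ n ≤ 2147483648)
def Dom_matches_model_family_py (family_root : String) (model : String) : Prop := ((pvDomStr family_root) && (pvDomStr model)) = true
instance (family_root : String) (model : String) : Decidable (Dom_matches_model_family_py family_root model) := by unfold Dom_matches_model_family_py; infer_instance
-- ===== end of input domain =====

-- B fuses A's equality test and four-separator prefix loop into one simultaneous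
-- character-by-character scan of the two strings (objective: alternative).

-- ===== PORT A =====
def matches_model_family_py (family_root : String) (model : String) : Bool :=
  if family_root.toList = [] ∨ model.toList = [] then false
  else if model.toList = family_root.toList then true
  else (['-', '.', '_', '/'] : List Char).any (fun sep =>
    PySem.Chars.startswith model.toList (family_root.toList ++ [sep]))

-- ===== PORT B =====
-- Source B's index loop, as structural recursion consuming both strings in step
def mmfScan : List Char → List Char → Bool
  | [], [] => true
  | [], c :: _ => c == '-' || c == '.' || c == '_' || c == '/'
  | _ :: _, [] => false
  | r :: rs, c :: ms => r == c && mmfScan rs ms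

def matches_model_family_py_alt (family_root : String) (model : String) : Bool :=
  if family_root.toList = [] ∨ model.toList = [] then false
  else mmfScan family_root.toList model.toList

-- ===== PRECONDITION & SPEC =====
def Spec_matches_model_family_py (family_root : String) (model : String) (out : Bool) : Prop := out = matches_model_family_py_alt family_root model
instance (family_root : String) (model : String) (out : Bool) : Decidable (Spec_matches_model_family_py family_root model out) := by unfold Spec_matches_model_family_py; infer_instance

-- ===== CLAIM (what is proved, stated in full; the proofs are below) =====
def Claim_equal_matches_model_family_py : Prop := ∀ (family_root : String) (model : String), Dom_matches_model_family_py family_root model → Spec_matches_model_family_py family_root model (matches_model_family_py family_root model)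

-- ===== LEMMAS AND PROOFS =====

def mmfSepc (c : Char) : Bool := c == '-' || c == '.' || c == '_' || c == '/'

-- a list with one element appended is a prefix iff the shorter list is a prefix and
-- the element sits right after it
theorem prefix_append_singleton_iff {α : Type} (r : List α) (c : α) (m : List α) :
    r ++ [c] <+: m ↔ r <+: m ∧ m[r.length]? = some c := by
  constructor
  · rintro ⟨t, ht⟩
    subst ht
    refine ⟨⟨c :: t, by simp⟩, ?_⟩
    simp
  · rintro ⟨⟨t, ht⟩, hc⟩
    subst ht
    rw [List.getElem?_append_right (le_refl _)] at hc
    simp at hc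
    cases t with
    | nil => simp at hc
    | cons x xs =>
      simp at hc
      exact ⟨xs, by simp [hc]⟩

theorem startswith_append_singleton (r : List Char) (c : Char) (m : List Char) :
    PySem.Chars.startswith m (r ++ [c]) =
      (PySem.Chars.startswith m r && (m[r.length]? == some c)) := by
  by_cases hp : r ++ [c] <+: m
  · obtain ⟨h2, h3⟩ := (prefix_append_singleton_iff r c m).mp hp
    rw [(PySem.Chars.startswith_iff _ _).mpr hp, (PySem.Chars.startswith_iff _ _).mpr h2, h3]
    simp
  · have h1 : PySem.Chars.startswith m (r ++ [c]) = false := by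
      rw [← Bool.not_eq_true, PySem.Chars.startswith_iff]; exact hp
    rw [h1]
    cases h2 : PySem.Chars.startswith m r with
    | false => simp
    | true =>
      have hr : r <+: m := (PySem.Chars.startswith_iff _ _).mp h2
      have hc : m[r.length]? ≠ some c := fun hc =>
        hp ((prefix_append_singleton_iff r c m).mpr ⟨hr, hc⟩)
      simp [hc]

-- characterises B's fused scan in terms of equality / prefix / next-character
theorem mmfScan_eq (r : List Char) : ∀ (m : List Char),
    mmfScan r m = (decide (m = r) ||
      (PySem.Chars.startswith m r && (m[r.length]?.map mmfSepc).getD false)) := by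
  induction r with
  | nil =>
    intro m
    cases m with
    | nil => simp [mmfScan]
    | cons c ms =>
      have hs : PySem.Chars.startswith (c :: ms) [] = true :=
        (PySem.Chars.startswith_iff _ _).mpr (List.nil_prefix)
      simp [mmfScan, hs, mmfSepc]
  | cons a rs ih =>
    intro m
    cases m with
    | nil =>
      have hs : PySem.Chars.startswith ([] : List Char) (a :: rs) = false := by
        rw [← Bool.not_eq_true, PySem.Chars.startswith_iff]
        intro h
        exact absurd (List.eq_nil_of_prefix_nil h) (by simp)
      simp [mmfScan, hs]
    | cons c ms =>
      have hsw : PySem.Chars.startswith (c :: ms) (a :: rs) =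
          (a == c && PySem.Chars.startswith ms rs) := by
        by_cases hac : a = c
        · subst hac
          by_cases h : rs <+: ms
          · rw [(PySem.Chars.startswith_iff _ _).mpr (List.prefix_cons_inj a |>.mpr h)]
            rw [(PySem.Chars.startswith_iff _ _).mpr h]; simp
          · have h1 : PySem.Chars.startswith (a :: ms) (a :: rs) = false := by
              rw [← Bool.not_eq_true, PySem.Chars.startswith_iff]
              intro hp; exact h ((List.prefix_cons_inj a).mp hp)
            have h2 : PySem.Chars.startswith ms rs = false := by
              rw [← Bool.not_eq_true, PySem.Chars.startswith_iff]; exact h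
            simp [h1, h2]
        · have h1 : PySem.Chars.startswith (c :: ms) (a :: rs) = false := by
            rw [← Bool.not_eq_true, PySem.Chars.startswith_iff]
            intro hp
            rcases hp with ⟨t, ht⟩
            simp at ht
            exact hac ht.1
          simp [h1, hac]
      by_cases hac : a = c
      · subst hac
        simp only [mmfScan, hsw, ih ms]
        simp [Bool.and_or_distrib_left]
      · have hb : (a == c) = false := by simp [hac]
        have hne : (c :: ms) ≠ (a :: rs) := by
          intro h; injection h with h1 _; exact hac h1.symm
        simp [mmfScan, hsw, hb, hne]

-- ===== VERDICT (by name: the statement is the Claim_ definition above) =====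
theorem matches_model_family_py_spec : Claim_equal_matches_model_family_py := by
  intro family_root model _
  unfold Spec_matches_model_family_py matches_model_family_py matches_model_family_py_alt
  split
  · rfl
  · split
    · rename_i h
      rw [mmfScan_eq, h]
      simp
    · rename_i hne
      rw [mmfScan_eq]
      simp only [List.any_cons, List.any_nil, startswith_append_singleton, hne]
      cases h : model.toList[family_root.toList.length]? with
      | none => simp
      | some c =>
        cases hs : PySem.Chars.startswith model.toList family_root.toList <;>
          simp [mmfSepc, Bool.or_assoc]
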